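-- pv_equiv track=rewrite | github.com/dustinober1/cli | vibe_coder/commands/slash/file_ops.py | _analyze_javascript_code
-- ===== SOURCE A (Python) =====
-- from typing import Any, Dict, List
--
-- def _analyze_javascript_code(content: str, lines: List[str]) -> Dict[str, Any]:
--     """Analyze JavaScript/TypeScript code."""
--     analysis = {
--         "functions": 0,
--         "classes": 0,
--         "imports": 0,
--         "exports": 0,
--         "comments": 0,
--     }
--
--     for line in lines:
--         stripped = line.strip()
--         if "function " in stripped or "=>" in stripped:
--             analysis["functions"] += 1
--         if "class " in stripped:
--             analysis["classes"] += 1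
--         if stripped.startswith("import "):
--             analysis["imports"] += 1
--         if "export " in stripped:
--             analysis["exports"] += 1
--         if stripped.startswith("//") or "/*" in stripped:
--             analysis["comments"] += 1
--
--     return analysis
-- ===== SOURCE B (Python) =====
-- def _analyze_javascript_code(content, lines):
--     """Analyze JavaScript/TypeScript code: five independent counting passes."""
--     return {
--         "functions": sum(1 for l in lines if "function " in l.strip() or "=>" in l.strip()),
--         "classes": sum(1 for l in lines if "class " in l.strip()),
--         "imports": sum(1 for l in lines if l.strip().startswith("import ")),
--         "exports": sum(1 for l in lines if "export " in l.strip()),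
--         "comments": sum(1 for l in lines if l.strip().startswith("//") or "/*" in l.strip()),
--     }
-- ===== Notes on version B (the rewrite author's own statement) =====
-- stated objective: alternative
-- what changed: Replaced the single accumulating loop that maintains five counters in a dict with five independent counting passes (one sum-of-generator per category) whose totals build the result dict directly.
import Mathlib
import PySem

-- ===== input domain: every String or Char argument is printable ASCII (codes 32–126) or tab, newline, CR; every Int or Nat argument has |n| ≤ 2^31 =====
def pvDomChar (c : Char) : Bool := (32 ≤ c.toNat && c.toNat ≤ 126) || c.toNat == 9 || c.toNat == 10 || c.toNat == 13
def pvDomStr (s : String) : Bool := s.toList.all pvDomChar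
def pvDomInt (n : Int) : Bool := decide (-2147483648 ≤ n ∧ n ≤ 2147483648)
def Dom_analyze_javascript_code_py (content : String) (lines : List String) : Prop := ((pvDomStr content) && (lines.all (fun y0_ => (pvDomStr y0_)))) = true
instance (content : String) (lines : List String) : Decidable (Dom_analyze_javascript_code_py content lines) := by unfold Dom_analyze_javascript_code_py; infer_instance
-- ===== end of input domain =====

-- B replaces A's single five-counter accumulating loop by five independent counting passes; alternative decomposition, same cost.

-- ===== PORT A =====
-- one loop over lines, a dict of five counters updated in place
def analyzeStepA (d : PySem.Dict String Int) (line : String) : PySem.Dict String Int :=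
  let stripped := PySem.Str.strip line
  let d := if PySem.Str.isIn "function " stripped || PySem.Str.isIn "=>" stripped then
             d.modify "functions" 0 (· + 1) else d
  let d := if PySem.Str.isIn "class " stripped then d.modify "classes" 0 (· + 1) else d
  let d := if PySem.Str.startswith stripped "import " then d.modify "imports" 0 (· + 1) else d
  let d := if PySem.Str.isIn "export " stripped then d.modify "exports" 0 (· + 1) else d
  let d := if PySem.Str.startswith stripped "//" || PySem.Str.isIn "/*" stripped then
             d.modify "comments" 0 (· + 1) else d
  d

def analyze_javascript_code_py (content : String) (lines : List String) : List (String × Int) :=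
  (lines.foldl analyzeStepA
    (PySem.Dict.ofList [("functions", 0), ("classes", 0), ("imports", 0), ("exports", 0), ("comments", 0)])).items

-- ===== PORT B =====
-- five independent passes, one per category
def analyze_javascript_code_py_alt (content : String) (lines : List String) : List (String × Int) :=
  [ ("functions", (lines.countP (fun l => PySem.Str.isIn "function " (PySem.Str.strip l) || PySem.Str.isIn "=>" (PySem.Str.strip l)) : Int)),
    ("classes",   (lines.countP (fun l => PySem.Str.isIn "class " (PySem.Str.strip l)) : Int)),
    ("imports",   (lines.countP (fun l => PySem.Str.startswith (PySem.Str.strip l) "import ") : Int)),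
    ("exports",   (lines.countP (fun l => PySem.Str.isIn "export " (PySem.Str.strip l)) : Int)),
    ("comments",  (lines.countP (fun l => PySem.Str.startswith (PySem.Str.strip l) "//" || PySem.Str.isIn "/*" (PySem.Str.strip l)) : Int)) ]

-- ===== PRECONDITION & SPEC =====
def Spec_analyze_javascript_code_py (content : String) (lines : List String) (out : List (String × Int)) : Prop := out = analyze_javascript_code_py_alt content lines
instance (content : String) (lines : List String) (out : List (String × Int)) : Decidable (Spec_analyze_javascript_code_py content lines out) := by unfold Spec_analyze_javascript_code_py; infer_instance

-- ===== CLAIM (what is proved, stated in full; the proofs are below) =====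
def Claim_equal_analyze_javascript_code_py : Prop := ∀ (content : String) (lines : List String), Dom_analyze_javascript_code_py content lines → Spec_analyze_javascript_code_py content lines (analyze_javascript_code_py content lines)

-- ===== LEMMAS AND PROOFS =====

-- one step of A's loop on a literal five-key dict, computed
theorem analyzeStepA_mk (line : String) (x1 x2 x3 x4 x5 : Int) :
    analyzeStepA (PySem.Dict.mk [("functions", x1), ("classes", x2), ("imports", x3), ("exports", x4), ("comments", x5)]) line =
    PySem.Dict.mk
      [ ("functions", x1 + (if PySem.Str.isIn "function " (PySem.Str.strip line) || PySem.Str.isIn "=>" (PySem.Str.strip line) then 1 else 0)),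
        ("classes",   x2 + (if PySem.Str.isIn "class " (PySem.Str.strip line) then 1 else 0)),
        ("imports",   x3 + (if PySem.Str.startswith (PySem.Str.strip line) "import " then 1 else 0)),
        ("exports",   x4 + (if PySem.Str.isIn "export " (PySem.Str.strip line) then 1 else 0)),
        ("comments",  x5 + (if PySem.Str.startswith (PySem.Str.strip line) "//" || PySem.Str.isIn "/*" (PySem.Str.strip line) then 1 else 0)) ] := by
  unfold analyzeStepA
  split_ifs <;> simp_all [PySem.Dict.modify] <;> rfl

theorem foldl_analyzeStepA (lines : List String) (x1 x2 x3 x4 x5 : Int) :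
    lines.foldl analyzeStepA (PySem.Dict.mk [("functions", x1), ("classes", x2), ("imports", x3), ("exports", x4), ("comments", x5)]) =
    PySem.Dict.mk
      [ ("functions", x1 + (lines.countP (fun l => PySem.Str.isIn "function " (PySem.Str.strip l) || PySem.Str.isIn "=>" (PySem.Str.strip l)) : Int)),
        ("classes",   x2 + (lines.countP (fun l => PySem.Str.isIn "class " (PySem.Str.strip l)) : Int)),
        ("imports",   x3 + (lines.countP (fun l => PySem.Str.startswith (PySem.Str.strip l) "import ") : Int)),
        ("exports",   x4 + (lines.countP (fun l => PySem.Str.isIn "export " (PySem.Str.strip l)) : Int)),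
        ("comments",  x5 + (lines.countP (fun l => PySem.Str.startswith (PySem.Str.strip l) "//" || PySem.Str.isIn "/*" (PySem.Str.strip l)) : Int)) ] := by
  induction lines generalizing x1 x2 x3 x4 x5 with
  | nil => simp
  | cons l ls ih =>
    rw [List.foldl_cons, analyzeStepA_mk, ih]
    simp only [List.countP_cons, PySem.Dict.mk.injEq, List.cons.injEq, Prod.mk.injEq]
    and_intros <;> try rfl
    all_goals push_cast
    all_goals try split_ifs <;> try ring

-- ===== VERDICT (by name: the statement is the Claim_ definition above) =====
theorem analyze_javascript_code_py_spec : Claim_equal_analyze_javascript_code_py := by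
  intro content lines _
  unfold Spec_analyze_javascript_code_py analyze_javascript_code_py analyze_javascript_code_py_alt
  have hof : PySem.Dict.ofList ([("functions", (0:Int)), ("classes", 0), ("imports", 0), ("exports", 0), ("comments", 0)]) =
      PySem.Dict.mk [("functions", 0), ("classes", 0), ("imports", 0), ("exports", 0), ("comments", 0)] := by decide
  rw [hof, foldl_analyzeStepA]
  simp
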